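-- pv_equiv track=rewrite | github.com/vaibhav-jain-dev/learning-algo | problems/200-must-solve/arrays/02-sorted-squared-array/similar/01-merge-sorted-arrays-with-squares/python_code.py | merge_sorted_squares_four_pointers
-- ===== SOURCE A (Python) =====
-- from typing import List
--
-- def merge_sorted_squares_four_pointers(arr1: List[int], arr2: List[int]) -> List[int]:
--     """
--     Use four pointers to process both arrays simultaneously.
--
--     Insight: The largest squared value comes from one of 4 positions:
--     - Left or right end of arr1
--     - Left or right end of arr2
--
--     Build result from largest to smallest.
--     """
--     m, n = len(arr1), len(arr2)
--     result = [0] * (m + n)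
--     pos = m + n - 1
--
--     # Four pointers
--     l1, r1 = 0, m - 1
--     l2, r2 = 0, n - 1
--
--     while l1 <= r1 or l2 <= r2:
--         # Get candidates from both arrays (or -inf if exhausted)
--         candidates = []
--
--         if l1 <= r1:
--             candidates.append((arr1[l1] ** 2, 'l1'))
--             candidates.append((arr1[r1] ** 2, 'r1'))
--         if l2 <= r2:
--             candidates.append((arr2[l2] ** 2, 'l2'))
--             candidates.append((arr2[r2] ** 2, 'r2'))
--
--         # Find the maximum
--         max_val, pointer = max(candidates, key=lambda x: x[0])
--         result[pos] = max_val
--         pos -= 1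
--
--         # Move the appropriate pointer
--         if pointer == 'l1':
--             l1 += 1
--         elif pointer == 'r1':
--             r1 -= 1
--         elif pointer == 'l2':
--             l2 += 1
--         else:
--             r2 -= 1
--
--     return result
-- ===== SOURCE B (Python) =====
-- from typing import List
--
--
-- def merge_sorted_squares_four_pointers(arr1: List[int], arr2: List[int]) -> List[int]:
--     """Decompose: each array's descending end-squares sequence is computed by its own
--     two-pointer pass; the two sequences are then merged and the result reversed."""
--
--     def ends_desc(arr):
--         seq = []
--         l, r = 0, len(arr) - 1
--         while l <= r:
--             left_sq, right_sq = arr[l] * arr[l], arr[r] * arr[r]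
--             if left_sq >= right_sq:
--                 seq.append(left_sq)
--                 l += 1
--             else:
--                 seq.append(right_sq)
--                 r -= 1
--         return seq
--
--     s1, s2 = ends_desc(arr1), ends_desc(arr2)
--     merged = []
--     i = j = 0
--     while i < len(s1) and j < len(s2):
--         if s1[i] >= s2[j]:
--             merged.append(s1[i])
--             i += 1
--         else:
--             merged.append(s2[j])
--             j += 1
--     merged.extend(s1[i:])
--     merged.extend(s2[j:])
--     merged.reverse()
--     return merged
-- ===== Notes on version B (the rewrite author's own statement) =====
-- stated objective: faster
-- what changed: Replaces the single interleaved four-pointer loop (per-step candidate tuple list + max(key=...) + preallocated array filled back-to-front) by a decomposition: each array's descending end-squares sequence is computed independently by a plain two-pointer pass, the two sequences are merged by a standard two-list merge, and the result is reversed.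
import Mathlib
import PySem

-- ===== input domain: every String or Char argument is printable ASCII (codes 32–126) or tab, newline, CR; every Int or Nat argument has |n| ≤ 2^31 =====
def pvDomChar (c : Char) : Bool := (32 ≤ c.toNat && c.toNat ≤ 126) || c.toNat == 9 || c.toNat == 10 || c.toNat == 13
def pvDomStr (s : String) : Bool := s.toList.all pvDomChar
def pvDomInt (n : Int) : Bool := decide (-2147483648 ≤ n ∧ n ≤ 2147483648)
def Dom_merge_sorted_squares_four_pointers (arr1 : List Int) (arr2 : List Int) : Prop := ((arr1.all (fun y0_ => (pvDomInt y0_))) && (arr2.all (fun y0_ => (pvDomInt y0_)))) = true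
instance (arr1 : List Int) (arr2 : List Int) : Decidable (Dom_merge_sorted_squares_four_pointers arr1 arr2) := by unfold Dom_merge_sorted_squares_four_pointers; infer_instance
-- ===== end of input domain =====

-- B replaces A's interleaved four-pointer loop (candidate tuples + max(key=…) + back-filled
-- preallocated array) by a decomposition: each array's descending end-squares sequence is
-- produced by its own two-pointer pass, the two sequences are merged, and the result reversed.

-- ===== PORT A =====
-- Python's candidate list [(arr1[l1]**2,'l1'), …]; the indices are always in range when the
-- guards hold (0 ≤ l1 ≤ r1 < len arr1, same for arr2), so pyGetD's default 0 is unreachable.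
def pvCands (arr1 arr2 : List Int) (l1 r1 l2 r2 : Int) : List (Int × String) :=
  (if l1 ≤ r1 then
    [((PySem.List.pyGetD arr1 l1 0) ^ 2, "l1"), ((PySem.List.pyGetD arr1 r1 0) ^ 2, "r1")]
   else []) ++
  (if l2 ≤ r2 then
    [((PySem.List.pyGetD arr2 l2 0) ^ 2, "l2"), ((PySem.List.pyGetD arr2 r2 0) ^ 2, "r2")]
   else [])

-- A's while-loop; fuel = len arr1 + len arr2 bounds the iteration count exactly (each pass
-- moves one pointer of a non-exhausted side), so the fuel-0 branch is never the one that stops.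
def pvLoopA (arr1 arr2 : List Int) : Nat → List Int → Int → Int → Int → Int → Int → List Int
  | 0, result, _, _, _, _, _ => result
  | Nat.succ fuel, result, pos, l1, r1, l2, r2 =>
    if l1 ≤ r1 ∨ l2 ≤ r2 then
      match PySem.List.max? (pvCands arr1 arr2 l1 r1 l2 r2) (fun c => c.1) with
      | none => result   -- unreachable: the candidate list is nonempty when the guard holds
      | some (maxVal, pointer) =>
        let result' := PySem.List.pySetD result pos maxVal
        if pointer = "l1" then pvLoopA arr1 arr2 fuel result' (pos - 1) (l1 + 1) r1 l2 r2
        else if pointer = "r1" then pvLoopA arr1 arr2 fuel result' (pos - 1) l1 (r1 - 1) l2 r2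
        else if pointer = "l2" then pvLoopA arr1 arr2 fuel result' (pos - 1) l1 r1 (l2 + 1) r2
        else pvLoopA arr1 arr2 fuel result' (pos - 1) l1 r1 l2 (r2 - 1)
    else result

def merge_sorted_squares_four_pointers (arr1 : List Int) (arr2 : List Int) : List Int :=
  let m : Int := arr1.length
  let n : Int := arr2.length
  pvLoopA arr1 arr2 (arr1.length + arr2.length)
    (List.replicate (arr1.length + arr2.length) 0) (m + n - 1) 0 (m - 1) 0 (n - 1)

-- ===== PORT B =====
-- Source B's ends_desc: two pointers take the larger end square (left on ties), appending to seq.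
-- The indices are in range whenever l ≤ r holds, so pyGetD's default 0 is unreachable.
def pvEnds (arr : List Int) : Nat → List Int → Int → Int → List Int
  | 0, seq, _, _ => seq   -- fuel = len arr bounds the iteration count; never the stopping branch
  | Nat.succ fuel, seq, l, r =>
    if l ≤ r then
      let left_sq := PySem.List.pyGetD arr l 0 * PySem.List.pyGetD arr l 0
      let right_sq := PySem.List.pyGetD arr r 0 * PySem.List.pyGetD arr r 0
      if left_sq ≥ right_sq then pvEnds arr fuel (seq ++ [left_sq]) (l + 1) r
      else pvEnds arr fuel (seq ++ [right_sq]) l (r - 1)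
    else seq

-- Source B's merge while-loop; returns (merged, i, j) since i and j are still used afterwards.
-- s1[i]/s2[j] are in range under the guard, so getD's default 0 is unreachable.
def pvMergeLoop (s1 s2 : List Int) : Nat → List Int → Nat → Nat → List Int × Nat × Nat
  | 0, merged, i, j => (merged, i, j)   -- fuel = len s1 + len s2; never the stopping branch
  | Nat.succ fuel, merged, i, j =>
    if i < s1.length ∧ j < s2.length then
      if s1.getD i 0 ≥ s2.getD j 0 then pvMergeLoop s1 s2 fuel (merged ++ [s1.getD i 0]) (i + 1) j
      else pvMergeLoop s1 s2 fuel (merged ++ [s2.getD j 0]) i (j + 1)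
    else (merged, i, j)

-- Source B: merged.extend(s1[i:]); merged.extend(s2[j:]); merged.reverse()  (s1[i:] = drop, i ≥ 0)
def merge_sorted_squares_four_pointers_alt (arr1 : List Int) (arr2 : List Int) : List Int :=
  let s1 := pvEnds arr1 arr1.length [] 0 ((arr1.length : Int) - 1)
  let s2 := pvEnds arr2 arr2.length [] 0 ((arr2.length : Int) - 1)
  let res := pvMergeLoop s1 s2 (s1.length + s2.length) [] 0 0
  ((res.1 ++ s1.drop res.2.1) ++ s2.drop res.2.2).reverse

-- ===== PRECONDITION & SPEC =====
def Spec_merge_sorted_squares_four_pointers (arr1 : List Int) (arr2 : List Int) (out : List Int) : Prop := out = merge_sorted_squares_four_pointers_alt arr1 arr2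
instance (arr1 : List Int) (arr2 : List Int) (out : List Int) : Decidable (Spec_merge_sorted_squares_four_pointers arr1 arr2 out) := by unfold Spec_merge_sorted_squares_four_pointers; infer_instance

-- ===== CLAIM (what is proved, stated in full; the proofs are below) =====
def Claim_equal_merge_sorted_squares_four_pointers : Prop := ∀ (arr1 : List Int) (arr2 : List Int), Dom_merge_sorted_squares_four_pointers arr1 arr2 → Spec_merge_sorted_squares_four_pointers arr1 arr2 (merge_sorted_squares_four_pointers arr1 arr2)

-- ===== LEMMAS AND PROOFS =====

-- proof-layer twin of pvEnds without the accumulator: the descending end-squares sequence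
def pvE (arr : List Int) (l r : Int) : List Int :=
  if h : l ≤ r then
    if PySem.List.pyGetD arr l 0 * PySem.List.pyGetD arr l 0 ≥
        PySem.List.pyGetD arr r 0 * PySem.List.pyGetD arr r 0 then
      PySem.List.pyGetD arr l 0 * PySem.List.pyGetD arr l 0 :: pvE arr (l + 1) r
    else
      PySem.List.pyGetD arr r 0 * PySem.List.pyGetD arr r 0 :: pvE arr l (r - 1)
  else []
termination_by (r + 1 - l).toNat
decreasing_by all_goals omega

-- proof-layer merge of two sequences, preferring the left one on ties
def pvM : List Int → List Int → List Int
  | [], t => t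
  | a :: s, [] => a :: s
  | a :: s, b :: t => if a ≥ b then a :: pvM s (b :: t) else b :: pvM (a :: s) t

lemma pvE_cons_l {arr : List Int} {l r : Int} (h : l ≤ r)
    (hc : PySem.List.pyGetD arr l 0 * PySem.List.pyGetD arr l 0 ≥
      PySem.List.pyGetD arr r 0 * PySem.List.pyGetD arr r 0) :
    pvE arr l r = PySem.List.pyGetD arr l 0 * PySem.List.pyGetD arr l 0 :: pvE arr (l + 1) r := by
  rw [pvE, dif_pos h, if_pos hc]

lemma pvE_cons_r {arr : List Int} {l r : Int} (h : l ≤ r)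
    (hc : ¬ PySem.List.pyGetD arr l 0 * PySem.List.pyGetD arr l 0 ≥
      PySem.List.pyGetD arr r 0 * PySem.List.pyGetD arr r 0) :
    pvE arr l r = PySem.List.pyGetD arr r 0 * PySem.List.pyGetD arr r 0 :: pvE arr l (r - 1) := by
  rw [pvE, dif_pos h, if_neg hc]

lemma pvE_nil {arr : List Int} {l r : Int} (h : ¬ l ≤ r) : pvE arr l r = [] := by
  rw [pvE, dif_neg h]

lemma pvM_nil_left (t : List Int) : pvM [] t = t := by simp [pvM]

lemma pvM_nil_right (s : List Int) : pvM s [] = s := by cases s <;> simp [pvM]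

lemma pvM_left {a b : Int} {s t : List Int} (h : a ≥ b) :
    pvM (a :: s) (b :: t) = a :: pvM s (b :: t) := by
  simp [pvM, h]

lemma pvM_right {a b : Int} {s t : List Int} (h : ¬ a ≥ b) :
    pvM (a :: s) (b :: t) = b :: pvM (a :: s) t := by
  simp [pvM, h]

-- Python's max on a two- and a four-element candidate list: the FIRST maximal element
lemma pvMax2 (a b : Int) (sa sb : String) :
    PySem.List.max? [(a, sa), (b, sb)] (fun c => c.1)
      = some (if a < b then (b, sb) else (a, sa)) := by
  by_cases h1 : a < b <;> simp [PySem.List.max?, h1]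

lemma pvMax4 (a b c d : Int) (sa sb sc sd : String) :
    PySem.List.max? [(a, sa), (b, sb), (c, sc), (d, sd)] (fun c => c.1)
      = some (if a < b then
            (if b < c then (if c < d then (d, sd) else (c, sc))
             else (if b < d then (d, sd) else (b, sb)))
          else
            (if a < c then (if c < d then (d, sd) else (c, sc))
             else (if a < d then (d, sd) else (a, sa)))) := by
  by_cases h1 : a < b
  · by_cases h2 : b < c
    · by_cases h3 : c < d <;> simp [PySem.List.max?, h1, h2, h3]
    · by_cases h3 : b < d <;> simp [PySem.List.max?, h1, h2, h3]
  · by_cases h2 : a < c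
    · by_cases h3 : c < d <;> simp [PySem.List.max?, h1, h2, h3]
    · by_cases h3 : a < d <;> simp [PySem.List.max?, h1, h2, h3]

lemma pvEnds_eq (arr : List Int) : ∀ (fuel : Nat) (seq : List Int) (l r : Int),
    (r + 1 - l).toNat ≤ fuel → pvEnds arr fuel seq l r = seq ++ pvE arr l r := by
  intro fuel
  induction fuel with
  | zero =>
    intro seq l r hf
    rw [pvE_nil (by omega)]
    simp [pvEnds]
  | succ fuel ih =>
    intro seq l r hf
    by_cases h : l ≤ r
    · simp only [pvEnds]
      rw [if_pos h]
      by_cases hc : PySem.List.pyGetD arr l 0 * PySem.List.pyGetD arr l 0 ≥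
          PySem.List.pyGetD arr r 0 * PySem.List.pyGetD arr r 0
      · rw [if_pos hc, ih _ _ _ (by omega), pvE_cons_l h hc]
        simp
      · rw [if_neg hc, ih _ _ _ (by omega), pvE_cons_r h hc]
        simp
    · rw [pvE_nil h]
      simp [pvEnds, h]

lemma pvMergeLoop_eq (s1 s2 : List Int) : ∀ (fuel : Nat) (merged : List Int) (i j : Nat),
    (s1.length - i) + (s2.length - j) ≤ fuel →
    ((pvMergeLoop s1 s2 fuel merged i j).1 ++ s1.drop (pvMergeLoop s1 s2 fuel merged i j).2.1)
        ++ s2.drop (pvMergeLoop s1 s2 fuel merged i j).2.2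
      = merged ++ pvM (s1.drop i) (s2.drop j) := by
  intro fuel
  induction fuel with
  | zero =>
    intro merged i j hf
    have hi : s1.length ≤ i := by omega
    simp only [pvMergeLoop]
    rw [List.drop_eq_nil_of_le hi, pvM_nil_left]
    simp
  | succ fuel ih =>
    intro merged i j hf
    by_cases h : i < s1.length ∧ j < s2.length
    · simp only [pvMergeLoop]
      rw [if_pos h]
      by_cases hc : s1.getD i 0 ≥ s2.getD j 0
      · rw [if_pos hc, ih _ _ _ (by omega)]
        rw [List.drop_eq_getElem_cons (show i < s1.length from h.1),
            List.drop_eq_getElem_cons (show j < s2.length from h.2)]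
        rw [pvM_left (by simpa [List.getD_eq_getElem?_getD, List.getElem?_eq_getElem h.1,
          List.getElem?_eq_getElem h.2] using hc)]
        simp [List.getD_eq_getElem?_getD, List.getElem?_eq_getElem h.1]
      · rw [if_neg hc, ih _ _ _ (by omega)]
        rw [List.drop_eq_getElem_cons (show i < s1.length from h.1),
            List.drop_eq_getElem_cons (show j < s2.length from h.2)]
        rw [pvM_right (by simpa [List.getD_eq_getElem?_getD, List.getElem?_eq_getElem h.1,
          List.getElem?_eq_getElem h.2] using hc)]
        simp [List.getD_eq_getElem?_getD, List.getElem?_eq_getElem h.2]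
    · simp only [pvMergeLoop]
      rw [if_neg h]
      rcases Nat.lt_or_ge i s1.length with hi | hi
      · have hj : s2.length ≤ j := by omega
        rw [List.drop_eq_nil_of_le hj, pvM_nil_right]
        simp
      · rw [List.drop_eq_nil_of_le hi, pvM_nil_left]
        simp

lemma pv_drop_set (l : List Int) (n : Nat) (v : Int) (h : n < l.length) :
    (l.set n v).drop n = v :: l.drop (n + 1) := by
  induction l generalizing n with
  | nil => simp at h
  | cons a t ih =>
    cases n with
    | zero => simp
    | succ m => simpa using ih m (by simpa using h)

set_option maxHeartbeats 3200000 in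
lemma pvLoopA_spec (arr1 arr2 : List Int) :
    ∀ (fuel : Nat) (result : List Int) (pos l1 r1 l2 r2 : Int),
      (r1 + 1 - l1).toNat + (r2 + 1 - l2).toNat ≤ fuel →
      (r1 + 1 - l1).toNat + (r2 + 1 - l2).toNat ≤ result.length →
      pos = ((r1 + 1 - l1).toNat + (r2 + 1 - l2).toNat : Nat) - 1 →
      pvLoopA arr1 arr2 fuel result pos l1 r1 l2 r2
        = (pvM (pvE arr1 l1 r1) (pvE arr2 l2 r2)).reverse
          ++ result.drop ((r1 + 1 - l1).toNat + (r2 + 1 - l2).toNat) := by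
  intro fuel
  induction fuel with
  | zero =>
    intro result pos l1 r1 l2 r2 hfuel hlen hpos
    have hg1 : ¬ l1 ≤ r1 := by omega
    have hg2 : ¬ l2 ≤ r2 := by omega
    have hk1 : (r1 + 1 - l1).toNat = 0 := by omega
    have hk2 : (r2 + 1 - l2).toNat = 0 := by omega
    rw [pvE_nil hg1, pvE_nil hg2, pvM_nil_left]
    simp [pvLoopA, hk1, hk2]
  | succ fuel ih =>
    intro result pos l1 r1 l2 r2 hfuel hlen hpos
    by_cases hg : l1 ≤ r1 ∨ l2 ≤ r2
    case neg =>
      have hg1 : ¬ l1 ≤ r1 := fun h => hg (Or.inl h)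
      have hg2 : ¬ l2 ≤ r2 := fun h => hg (Or.inr h)
      have hk1 : (r1 + 1 - l1).toNat = 0 := by omega
      have hk2 : (r2 + 1 - l2).toNat = 0 := by omega
      rw [pvE_nil hg1, pvE_nil hg2, pvM_nil_left]
      simp [pvLoopA, hg, hk1, hk2]
    case pos =>
      have hpos0 : 0 ≤ pos := by
        rcases hg with h | h <;> omega
      simp only [pvLoopA]
      rw [if_pos hg]
      split
      · rename_i heq
        exfalso
        have hne : pvCands arr1 arr2 l1 r1 l2 r2 ≠ [] := by
          unfold pvCands; rcases hg with h | h <;> simp [h]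
        exact hne ((PySem.List.max?_eq_none_iff _ _).1 heq)
      · rename_i v ptr heq
        by_cases h1 : l1 ≤ r1
        · by_cases h2 : l2 ≤ r2
          · -- both sides still active: four candidates
            simp [pvCands, h1, h2, pow_two] at heq
            rw [pvMax4] at heq
            simp only [Option.some.injEq] at heq
            by_cases h3 : PySem.List.pyGetD arr1 l1 0 * PySem.List.pyGetD arr1 l1 0 < PySem.List.pyGetD arr1 r1 0 * PySem.List.pyGetD arr1 r1 0
            · simp only [if_pos h3] at heq
              by_cases h4 : PySem.List.pyGetD arr1 r1 0 * PySem.List.pyGetD arr1 r1 0 < PySem.List.pyGetD arr2 l2 0 * PySem.List.pyGetD arr2 l2 0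
              · simp only [if_pos h4] at heq
                by_cases h5 : PySem.List.pyGetD arr2 l2 0 * PySem.List.pyGetD arr2 l2 0 < PySem.List.pyGetD arr2 r2 0 * PySem.List.pyGetD arr2 r2 0
                · simp only [if_pos h5] at heq
                  rw [Prod.mk.injEq] at heq
                  obtain ⟨hv, hp⟩ := heq
                  subst hv; subst hp
                  rw [if_neg (by decide), if_neg (by decide), if_neg (by decide)]
                  rw [ih _ (pos - 1) l1 r1 l2 (r2 - 1) (by omega)
                    (by rw [PySem.List.length_pySetD]; omega) (by omega)]
                  rw [pvE_cons_r h1 (by linarith : ¬ (PySem.List.pyGetD arr1 l1 0 * PySem.List.pyGetD arr1 l1 0 ≥ PySem.List.pyGetD arr1 r1 0 * PySem.List.pyGetD arr1 r1 0))]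
                  rw [pvE_cons_r h2 (by linarith : ¬ (PySem.List.pyGetD arr2 l2 0 * PySem.List.pyGetD arr2 l2 0 ≥ PySem.List.pyGetD arr2 r2 0 * PySem.List.pyGetD arr2 r2 0))]
                  rw [pvM_right (by linarith : ¬ ((PySem.List.pyGetD arr1 r1 0 * PySem.List.pyGetD arr1 r1 0) ≥ (PySem.List.pyGetD arr2 r2 0 * PySem.List.pyGetD arr2 r2 0)))]
                  rw [PySem.List.pySetD_of_nonneg result _ hpos0]
                  have hd : (result.set pos.toNat (PySem.List.pyGetD arr2 r2 0 * PySem.List.pyGetD arr2 r2 0)).drop ((r1 + 1 - l1).toNat + (r2 - 1 + 1 - l2).toNat)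
                      = PySem.List.pyGetD arr2 r2 0 * PySem.List.pyGetD arr2 r2 0 :: result.drop ((r1 + 1 - l1).toNat + (r2 + 1 - l2).toNat) := by
                    have e1 : pos.toNat = ((r1 + 1 - l1).toNat + (r2 - 1 + 1 - l2).toNat) := by omega
                    have e2 : ((r1 + 1 - l1).toNat + (r2 + 1 - l2).toNat) = ((r1 + 1 - l1).toNat + (r2 - 1 + 1 - l2).toNat) + 1 := by omega
                    rw [e1, e2]
                    exact pv_drop_set result _ _ (by omega)
                  rw [hd]
                  simp
                · simp only [if_neg h5] at heq
                  rw [Prod.mk.injEq] at heq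
                  obtain ⟨hv, hp⟩ := heq
                  subst hv; subst hp
                  rw [if_neg (by decide), if_neg (by decide), if_pos rfl]
                  rw [ih _ (pos - 1) l1 r1 (l2 + 1) r2 (by omega)
                    (by rw [PySem.List.length_pySetD]; omega) (by omega)]
                  rw [pvE_cons_r h1 (by linarith : ¬ (PySem.List.pyGetD arr1 l1 0 * PySem.List.pyGetD arr1 l1 0 ≥ PySem.List.pyGetD arr1 r1 0 * PySem.List.pyGetD arr1 r1 0))]
                  rw [pvE_cons_l h2 (by linarith : PySem.List.pyGetD arr2 l2 0 * PySem.List.pyGetD arr2 l2 0 ≥ PySem.List.pyGetD arr2 r2 0 * PySem.List.pyGetD arr2 r2 0)]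
                  rw [pvM_right (by linarith : ¬ ((PySem.List.pyGetD arr1 r1 0 * PySem.List.pyGetD arr1 r1 0) ≥ (PySem.List.pyGetD arr2 l2 0 * PySem.List.pyGetD arr2 l2 0)))]
                  rw [PySem.List.pySetD_of_nonneg result _ hpos0]
                  have hd : (result.set pos.toNat (PySem.List.pyGetD arr2 l2 0 * PySem.List.pyGetD arr2 l2 0)).drop ((r1 + 1 - l1).toNat + (r2 + 1 - (l2 + 1)).toNat)
                      = PySem.List.pyGetD arr2 l2 0 * PySem.List.pyGetD arr2 l2 0 :: result.drop ((r1 + 1 - l1).toNat + (r2 + 1 - l2).toNat) := by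
                    have e1 : pos.toNat = ((r1 + 1 - l1).toNat + (r2 + 1 - (l2 + 1)).toNat) := by omega
                    have e2 : ((r1 + 1 - l1).toNat + (r2 + 1 - l2).toNat) = ((r1 + 1 - l1).toNat + (r2 + 1 - (l2 + 1)).toNat) + 1 := by omega
                    rw [e1, e2]
                    exact pv_drop_set result _ _ (by omega)
                  rw [hd]
                  simp
              · simp only [if_neg h4] at heq
                by_cases h5 : PySem.List.pyGetD arr1 r1 0 * PySem.List.pyGetD arr1 r1 0 < PySem.List.pyGetD arr2 r2 0 * PySem.List.pyGetD arr2 r2 0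
                · simp only [if_pos h5] at heq
                  rw [Prod.mk.injEq] at heq
                  obtain ⟨hv, hp⟩ := heq
                  subst hv; subst hp
                  rw [if_neg (by decide), if_neg (by decide), if_neg (by decide)]
                  rw [ih _ (pos - 1) l1 r1 l2 (r2 - 1) (by omega)
                    (by rw [PySem.List.length_pySetD]; omega) (by omega)]
                  rw [pvE_cons_r h1 (by linarith : ¬ (PySem.List.pyGetD arr1 l1 0 * PySem.List.pyGetD arr1 l1 0 ≥ PySem.List.pyGetD arr1 r1 0 * PySem.List.pyGetD arr1 r1 0))]
                  rw [pvE_cons_r h2 (by linarith : ¬ (PySem.List.pyGetD arr2 l2 0 * PySem.List.pyGetD arr2 l2 0 ≥ PySem.List.pyGetD arr2 r2 0 * PySem.List.pyGetD arr2 r2 0))]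
                  rw [pvM_right (by linarith : ¬ ((PySem.List.pyGetD arr1 r1 0 * PySem.List.pyGetD arr1 r1 0) ≥ (PySem.List.pyGetD arr2 r2 0 * PySem.List.pyGetD arr2 r2 0)))]
                  rw [PySem.List.pySetD_of_nonneg result _ hpos0]
                  have hd : (result.set pos.toNat (PySem.List.pyGetD arr2 r2 0 * PySem.List.pyGetD arr2 r2 0)).drop ((r1 + 1 - l1).toNat + (r2 - 1 + 1 - l2).toNat)
                      = PySem.List.pyGetD arr2 r2 0 * PySem.List.pyGetD arr2 r2 0 :: result.drop ((r1 + 1 - l1).toNat + (r2 + 1 - l2).toNat) := by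
                    have e1 : pos.toNat = ((r1 + 1 - l1).toNat + (r2 - 1 + 1 - l2).toNat) := by omega
                    have e2 : ((r1 + 1 - l1).toNat + (r2 + 1 - l2).toNat) = ((r1 + 1 - l1).toNat + (r2 - 1 + 1 - l2).toNat) + 1 := by omega
                    rw [e1, e2]
                    exact pv_drop_set result _ _ (by omega)
                  rw [hd]
                  simp
                · simp only [if_neg h5] at heq
                  rw [Prod.mk.injEq] at heq
                  obtain ⟨hv, hp⟩ := heq
                  subst hv; subst hp
                  by_cases hE : PySem.List.pyGetD arr2 l2 0 * PySem.List.pyGetD arr2 l2 0 ≥ PySem.List.pyGetD arr2 r2 0 * PySem.List.pyGetD arr2 r2 0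
                  · rw [if_neg (by decide), if_pos rfl]
                    rw [ih _ (pos - 1) l1 (r1 - 1) l2 r2 (by omega)
                      (by rw [PySem.List.length_pySetD]; omega) (by omega)]
                    rw [pvE_cons_r h1 (by linarith : ¬ (PySem.List.pyGetD arr1 l1 0 * PySem.List.pyGetD arr1 l1 0 ≥ PySem.List.pyGetD arr1 r1 0 * PySem.List.pyGetD arr1 r1 0))]
                    rw [pvE_cons_l h2 hE]
                    rw [pvM_left (by linarith : (PySem.List.pyGetD arr1 r1 0 * PySem.List.pyGetD arr1 r1 0) ≥ (PySem.List.pyGetD arr2 l2 0 * PySem.List.pyGetD arr2 l2 0))]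
                    rw [PySem.List.pySetD_of_nonneg result _ hpos0]
                    have hd : (result.set pos.toNat (PySem.List.pyGetD arr1 r1 0 * PySem.List.pyGetD arr1 r1 0)).drop ((r1 - 1 + 1 - l1).toNat + (r2 + 1 - l2).toNat)
                        = PySem.List.pyGetD arr1 r1 0 * PySem.List.pyGetD arr1 r1 0 :: result.drop ((r1 + 1 - l1).toNat + (r2 + 1 - l2).toNat) := by
                      have e1 : pos.toNat = ((r1 - 1 + 1 - l1).toNat + (r2 + 1 - l2).toNat) := by omega
                      have e2 : ((r1 + 1 - l1).toNat + (r2 + 1 - l2).toNat) = ((r1 - 1 + 1 - l1).toNat + (r2 + 1 - l2).toNat) + 1 := by omega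
                      rw [e1, e2]
                      exact pv_drop_set result _ _ (by omega)
                    rw [hd]
                    simp
                  · rw [if_neg (by decide), if_pos rfl]
                    rw [ih _ (pos - 1) l1 (r1 - 1) l2 r2 (by omega)
                      (by rw [PySem.List.length_pySetD]; omega) (by omega)]
                    rw [pvE_cons_r h1 (by linarith : ¬ (PySem.List.pyGetD arr1 l1 0 * PySem.List.pyGetD arr1 l1 0 ≥ PySem.List.pyGetD arr1 r1 0 * PySem.List.pyGetD arr1 r1 0))]
                    rw [pvE_cons_r h2 hE]
                    rw [pvM_left (by linarith : (PySem.List.pyGetD arr1 r1 0 * PySem.List.pyGetD arr1 r1 0) ≥ (PySem.List.pyGetD arr2 r2 0 * PySem.List.pyGetD arr2 r2 0))]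
                    rw [PySem.List.pySetD_of_nonneg result _ hpos0]
                    have hd : (result.set pos.toNat (PySem.List.pyGetD arr1 r1 0 * PySem.List.pyGetD arr1 r1 0)).drop ((r1 - 1 + 1 - l1).toNat + (r2 + 1 - l2).toNat)
                        = PySem.List.pyGetD arr1 r1 0 * PySem.List.pyGetD arr1 r1 0 :: result.drop ((r1 + 1 - l1).toNat + (r2 + 1 - l2).toNat) := by
                      have e1 : pos.toNat = ((r1 - 1 + 1 - l1).toNat + (r2 + 1 - l2).toNat) := by omega
                      have e2 : ((r1 + 1 - l1).toNat + (r2 + 1 - l2).toNat) = ((r1 - 1 + 1 - l1).toNat + (r2 + 1 - l2).toNat) + 1 := by omega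
                      rw [e1, e2]
                      exact pv_drop_set result _ _ (by omega)
                    rw [hd]
                    simp
            · simp only [if_neg h3] at heq
              by_cases h4 : PySem.List.pyGetD arr1 l1 0 * PySem.List.pyGetD arr1 l1 0 < PySem.List.pyGetD arr2 l2 0 * PySem.List.pyGetD arr2 l2 0
              · simp only [if_pos h4] at heq
                by_cases h5 : PySem.List.pyGetD arr2 l2 0 * PySem.List.pyGetD arr2 l2 0 < PySem.List.pyGetD arr2 r2 0 * PySem.List.pyGetD arr2 r2 0
                · simp only [if_pos h5] at heq
                  rw [Prod.mk.injEq] at heq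
                  obtain ⟨hv, hp⟩ := heq
                  subst hv; subst hp
                  rw [if_neg (by decide), if_neg (by decide), if_neg (by decide)]
                  rw [ih _ (pos - 1) l1 r1 l2 (r2 - 1) (by omega)
                    (by rw [PySem.List.length_pySetD]; omega) (by omega)]
                  rw [pvE_cons_l h1 (by linarith : PySem.List.pyGetD arr1 l1 0 * PySem.List.pyGetD arr1 l1 0 ≥ PySem.List.pyGetD arr1 r1 0 * PySem.List.pyGetD arr1 r1 0)]
                  rw [pvE_cons_r h2 (by linarith : ¬ (PySem.List.pyGetD arr2 l2 0 * PySem.List.pyGetD arr2 l2 0 ≥ PySem.List.pyGetD arr2 r2 0 * PySem.List.pyGetD arr2 r2 0))]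
                  rw [pvM_right (by linarith : ¬ ((PySem.List.pyGetD arr1 l1 0 * PySem.List.pyGetD arr1 l1 0) ≥ (PySem.List.pyGetD arr2 r2 0 * PySem.List.pyGetD arr2 r2 0)))]
                  rw [PySem.List.pySetD_of_nonneg result _ hpos0]
                  have hd : (result.set pos.toNat (PySem.List.pyGetD arr2 r2 0 * PySem.List.pyGetD arr2 r2 0)).drop ((r1 + 1 - l1).toNat + (r2 - 1 + 1 - l2).toNat)
                      = PySem.List.pyGetD arr2 r2 0 * PySem.List.pyGetD arr2 r2 0 :: result.drop ((r1 + 1 - l1).toNat + (r2 + 1 - l2).toNat) := by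
                    have e1 : pos.toNat = ((r1 + 1 - l1).toNat + (r2 - 1 + 1 - l2).toNat) := by omega
                    have e2 : ((r1 + 1 - l1).toNat + (r2 + 1 - l2).toNat) = ((r1 + 1 - l1).toNat + (r2 - 1 + 1 - l2).toNat) + 1 := by omega
                    rw [e1, e2]
                    exact pv_drop_set result _ _ (by omega)
                  rw [hd]
                  simp
                · simp only [if_neg h5] at heq
                  rw [Prod.mk.injEq] at heq
                  obtain ⟨hv, hp⟩ := heq
                  subst hv; subst hp
                  rw [if_neg (by decide), if_neg (by decide), if_pos rfl]
                  rw [ih _ (pos - 1) l1 r1 (l2 + 1) r2 (by omega)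
                    (by rw [PySem.List.length_pySetD]; omega) (by omega)]
                  rw [pvE_cons_l h1 (by linarith : PySem.List.pyGetD arr1 l1 0 * PySem.List.pyGetD arr1 l1 0 ≥ PySem.List.pyGetD arr1 r1 0 * PySem.List.pyGetD arr1 r1 0)]
                  rw [pvE_cons_l h2 (by linarith : PySem.List.pyGetD arr2 l2 0 * PySem.List.pyGetD arr2 l2 0 ≥ PySem.List.pyGetD arr2 r2 0 * PySem.List.pyGetD arr2 r2 0)]
                  rw [pvM_right (by linarith : ¬ ((PySem.List.pyGetD arr1 l1 0 * PySem.List.pyGetD arr1 l1 0) ≥ (PySem.List.pyGetD arr2 l2 0 * PySem.List.pyGetD arr2 l2 0)))]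
                  rw [PySem.List.pySetD_of_nonneg result _ hpos0]
                  have hd : (result.set pos.toNat (PySem.List.pyGetD arr2 l2 0 * PySem.List.pyGetD arr2 l2 0)).drop ((r1 + 1 - l1).toNat + (r2 + 1 - (l2 + 1)).toNat)
                      = PySem.List.pyGetD arr2 l2 0 * PySem.List.pyGetD arr2 l2 0 :: result.drop ((r1 + 1 - l1).toNat + (r2 + 1 - l2).toNat) := by
                    have e1 : pos.toNat = ((r1 + 1 - l1).toNat + (r2 + 1 - (l2 + 1)).toNat) := by omega
                    have e2 : ((r1 + 1 - l1).toNat + (r2 + 1 - l2).toNat) = ((r1 + 1 - l1).toNat + (r2 + 1 - (l2 + 1)).toNat) + 1 := by omega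
                    rw [e1, e2]
                    exact pv_drop_set result _ _ (by omega)
                  rw [hd]
                  simp
              · simp only [if_neg h4] at heq
                by_cases h5 : PySem.List.pyGetD arr1 l1 0 * PySem.List.pyGetD arr1 l1 0 < PySem.List.pyGetD arr2 r2 0 * PySem.List.pyGetD arr2 r2 0
                · simp only [if_pos h5] at heq
                  rw [Prod.mk.injEq] at heq
                  obtain ⟨hv, hp⟩ := heq
                  subst hv; subst hp
                  rw [if_neg (by decide), if_neg (by decide), if_neg (by decide)]
                  rw [ih _ (pos - 1) l1 r1 l2 (r2 - 1) (by omega)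
                    (by rw [PySem.List.length_pySetD]; omega) (by omega)]
                  rw [pvE_cons_l h1 (by linarith : PySem.List.pyGetD arr1 l1 0 * PySem.List.pyGetD arr1 l1 0 ≥ PySem.List.pyGetD arr1 r1 0 * PySem.List.pyGetD arr1 r1 0)]
                  rw [pvE_cons_r h2 (by linarith : ¬ (PySem.List.pyGetD arr2 l2 0 * PySem.List.pyGetD arr2 l2 0 ≥ PySem.List.pyGetD arr2 r2 0 * PySem.List.pyGetD arr2 r2 0))]
                  rw [pvM_right (by linarith : ¬ ((PySem.List.pyGetD arr1 l1 0 * PySem.List.pyGetD arr1 l1 0) ≥ (PySem.List.pyGetD arr2 r2 0 * PySem.List.pyGetD arr2 r2 0)))]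
                  rw [PySem.List.pySetD_of_nonneg result _ hpos0]
                  have hd : (result.set pos.toNat (PySem.List.pyGetD arr2 r2 0 * PySem.List.pyGetD arr2 r2 0)).drop ((r1 + 1 - l1).toNat + (r2 - 1 + 1 - l2).toNat)
                      = PySem.List.pyGetD arr2 r2 0 * PySem.List.pyGetD arr2 r2 0 :: result.drop ((r1 + 1 - l1).toNat + (r2 + 1 - l2).toNat) := by
                    have e1 : pos.toNat = ((r1 + 1 - l1).toNat + (r2 - 1 + 1 - l2).toNat) := by omega
                    have e2 : ((r1 + 1 - l1).toNat + (r2 + 1 - l2).toNat) = ((r1 + 1 - l1).toNat + (r2 - 1 + 1 - l2).toNat) + 1 := by omega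
                    rw [e1, e2]
                    exact pv_drop_set result _ _ (by omega)
                  rw [hd]
                  simp
                · simp only [if_neg h5] at heq
                  rw [Prod.mk.injEq] at heq
                  obtain ⟨hv, hp⟩ := heq
                  subst hv; subst hp
                  by_cases hE : PySem.List.pyGetD arr2 l2 0 * PySem.List.pyGetD arr2 l2 0 ≥ PySem.List.pyGetD arr2 r2 0 * PySem.List.pyGetD arr2 r2 0
                  · rw [if_pos rfl]
                    rw [ih _ (pos - 1) (l1 + 1) r1 l2 r2 (by omega)
                      (by rw [PySem.List.length_pySetD]; omega) (by omega)]
                    rw [pvE_cons_l h1 (by linarith : PySem.List.pyGetD arr1 l1 0 * PySem.List.pyGetD arr1 l1 0 ≥ PySem.List.pyGetD arr1 r1 0 * PySem.List.pyGetD arr1 r1 0)]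
                    rw [pvE_cons_l h2 hE]
                    rw [pvM_left (by linarith : (PySem.List.pyGetD arr1 l1 0 * PySem.List.pyGetD arr1 l1 0) ≥ (PySem.List.pyGetD arr2 l2 0 * PySem.List.pyGetD arr2 l2 0))]
                    rw [PySem.List.pySetD_of_nonneg result _ hpos0]
                    have hd : (result.set pos.toNat (PySem.List.pyGetD arr1 l1 0 * PySem.List.pyGetD arr1 l1 0)).drop ((r1 + 1 - (l1 + 1)).toNat + (r2 + 1 - l2).toNat)
                        = PySem.List.pyGetD arr1 l1 0 * PySem.List.pyGetD arr1 l1 0 :: result.drop ((r1 + 1 - l1).toNat + (r2 + 1 - l2).toNat) := by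
                      have e1 : pos.toNat = ((r1 + 1 - (l1 + 1)).toNat + (r2 + 1 - l2).toNat) := by omega
                      have e2 : ((r1 + 1 - l1).toNat + (r2 + 1 - l2).toNat) = ((r1 + 1 - (l1 + 1)).toNat + (r2 + 1 - l2).toNat) + 1 := by omega
                      rw [e1, e2]
                      exact pv_drop_set result _ _ (by omega)
                    rw [hd]
                    simp
                  · rw [if_pos rfl]
                    rw [ih _ (pos - 1) (l1 + 1) r1 l2 r2 (by omega)
                      (by rw [PySem.List.length_pySetD]; omega) (by omega)]
                    rw [pvE_cons_l h1 (by linarith : PySem.List.pyGetD arr1 l1 0 * PySem.List.pyGetD arr1 l1 0 ≥ PySem.List.pyGetD arr1 r1 0 * PySem.List.pyGetD arr1 r1 0)]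
                    rw [pvE_cons_r h2 hE]
                    rw [pvM_left (by linarith : (PySem.List.pyGetD arr1 l1 0 * PySem.List.pyGetD arr1 l1 0) ≥ (PySem.List.pyGetD arr2 r2 0 * PySem.List.pyGetD arr2 r2 0))]
                    rw [PySem.List.pySetD_of_nonneg result _ hpos0]
                    have hd : (result.set pos.toNat (PySem.List.pyGetD arr1 l1 0 * PySem.List.pyGetD arr1 l1 0)).drop ((r1 + 1 - (l1 + 1)).toNat + (r2 + 1 - l2).toNat)
                        = PySem.List.pyGetD arr1 l1 0 * PySem.List.pyGetD arr1 l1 0 :: result.drop ((r1 + 1 - l1).toNat + (r2 + 1 - l2).toNat) := by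
                      have e1 : pos.toNat = ((r1 + 1 - (l1 + 1)).toNat + (r2 + 1 - l2).toNat) := by omega
                      have e2 : ((r1 + 1 - l1).toNat + (r2 + 1 - l2).toNat) = ((r1 + 1 - (l1 + 1)).toNat + (r2 + 1 - l2).toNat) + 1 := by omega
                      rw [e1, e2]
                      exact pv_drop_set result _ _ (by omega)
                    rw [hd]
                    simp
          · -- only arr1 active: two candidates
            simp [pvCands, h1, h2, pow_two] at heq
            rw [pvMax2] at heq
            simp only [Option.some.injEq] at heq
            by_cases h3 : PySem.List.pyGetD arr1 l1 0 * PySem.List.pyGetD arr1 l1 0 < PySem.List.pyGetD arr1 r1 0 * PySem.List.pyGetD arr1 r1 0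
            · simp only [if_pos h3] at heq
              rw [Prod.mk.injEq] at heq
              obtain ⟨hv, hp⟩ := heq
              subst hv; subst hp
              rw [if_neg (by decide), if_pos rfl]
              rw [ih _ (pos - 1) l1 (r1 - 1) l2 r2 (by omega)
                (by rw [PySem.List.length_pySetD]; omega) (by omega)]
              rw [pvE_cons_r h1 (by linarith : ¬ (PySem.List.pyGetD arr1 l1 0 * PySem.List.pyGetD arr1 l1 0 ≥ PySem.List.pyGetD arr1 r1 0 * PySem.List.pyGetD arr1 r1 0))]
              rw [pvE_nil h2]
              rw [pvM_nil_right, pvM_nil_right]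
              rw [PySem.List.pySetD_of_nonneg result _ hpos0]
              have hd : (result.set pos.toNat (PySem.List.pyGetD arr1 r1 0 * PySem.List.pyGetD arr1 r1 0)).drop ((r1 - 1 + 1 - l1).toNat + (r2 + 1 - l2).toNat)
                  = PySem.List.pyGetD arr1 r1 0 * PySem.List.pyGetD arr1 r1 0 :: result.drop ((r1 + 1 - l1).toNat + (r2 + 1 - l2).toNat) := by
                have e1 : pos.toNat = ((r1 - 1 + 1 - l1).toNat + (r2 + 1 - l2).toNat) := by omega
                have e2 : ((r1 + 1 - l1).toNat + (r2 + 1 - l2).toNat) = ((r1 - 1 + 1 - l1).toNat + (r2 + 1 - l2).toNat) + 1 := by omega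
                rw [e1, e2]
                exact pv_drop_set result _ _ (by omega)
              rw [hd]
              simp
            · simp only [if_neg h3] at heq
              rw [Prod.mk.injEq] at heq
              obtain ⟨hv, hp⟩ := heq
              subst hv; subst hp
              rw [if_pos rfl]
              rw [ih _ (pos - 1) (l1 + 1) r1 l2 r2 (by omega)
                (by rw [PySem.List.length_pySetD]; omega) (by omega)]
              rw [pvE_cons_l h1 (by linarith : PySem.List.pyGetD arr1 l1 0 * PySem.List.pyGetD arr1 l1 0 ≥ PySem.List.pyGetD arr1 r1 0 * PySem.List.pyGetD arr1 r1 0)]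
              rw [pvE_nil h2]
              rw [pvM_nil_right, pvM_nil_right]
              rw [PySem.List.pySetD_of_nonneg result _ hpos0]
              have hd : (result.set pos.toNat (PySem.List.pyGetD arr1 l1 0 * PySem.List.pyGetD arr1 l1 0)).drop ((r1 + 1 - (l1 + 1)).toNat + (r2 + 1 - l2).toNat)
                  = PySem.List.pyGetD arr1 l1 0 * PySem.List.pyGetD arr1 l1 0 :: result.drop ((r1 + 1 - l1).toNat + (r2 + 1 - l2).toNat) := by
                have e1 : pos.toNat = ((r1 + 1 - (l1 + 1)).toNat + (r2 + 1 - l2).toNat) := by omega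
                have e2 : ((r1 + 1 - l1).toNat + (r2 + 1 - l2).toNat) = ((r1 + 1 - (l1 + 1)).toNat + (r2 + 1 - l2).toNat) + 1 := by omega
                rw [e1, e2]
                exact pv_drop_set result _ _ (by omega)
              rw [hd]
              simp
        · -- only arr2 active: two candidates
          have h2 : l2 ≤ r2 := by tauto
          simp [pvCands, h1, h2, pow_two] at heq
          rw [pvMax2] at heq
          simp only [Option.some.injEq] at heq
          by_cases h3 : PySem.List.pyGetD arr2 l2 0 * PySem.List.pyGetD arr2 l2 0 < PySem.List.pyGetD arr2 r2 0 * PySem.List.pyGetD arr2 r2 0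
          · simp only [if_pos h3] at heq
            rw [Prod.mk.injEq] at heq
            obtain ⟨hv, hp⟩ := heq
            subst hv; subst hp
            rw [if_neg (by decide), if_neg (by decide), if_neg (by decide)]
            rw [ih _ (pos - 1) l1 r1 l2 (r2 - 1) (by omega)
              (by rw [PySem.List.length_pySetD]; omega) (by omega)]
            rw [pvE_cons_r h2 (by linarith : ¬ (PySem.List.pyGetD arr2 l2 0 * PySem.List.pyGetD arr2 l2 0 ≥ PySem.List.pyGetD arr2 r2 0 * PySem.List.pyGetD arr2 r2 0))]
            rw [pvE_nil h1]
            rw [pvM_nil_left, pvM_nil_left]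
            rw [PySem.List.pySetD_of_nonneg result _ hpos0]
            have hd : (result.set pos.toNat (PySem.List.pyGetD arr2 r2 0 * PySem.List.pyGetD arr2 r2 0)).drop ((r1 + 1 - l1).toNat + (r2 - 1 + 1 - l2).toNat)
                = PySem.List.pyGetD arr2 r2 0 * PySem.List.pyGetD arr2 r2 0 :: result.drop ((r1 + 1 - l1).toNat + (r2 + 1 - l2).toNat) := by
              have e1 : pos.toNat = ((r1 + 1 - l1).toNat + (r2 - 1 + 1 - l2).toNat) := by omega
              have e2 : ((r1 + 1 - l1).toNat + (r2 + 1 - l2).toNat) = ((r1 + 1 - l1).toNat + (r2 - 1 + 1 - l2).toNat) + 1 := by omega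
              rw [e1, e2]
              exact pv_drop_set result _ _ (by omega)
            rw [hd]
            simp
          · simp only [if_neg h3] at heq
            rw [Prod.mk.injEq] at heq
            obtain ⟨hv, hp⟩ := heq
            subst hv; subst hp
            rw [if_neg (by decide), if_neg (by decide), if_pos rfl]
            rw [ih _ (pos - 1) l1 r1 (l2 + 1) r2 (by omega)
              (by rw [PySem.List.length_pySetD]; omega) (by omega)]
            rw [pvE_cons_l h2 (by linarith : PySem.List.pyGetD arr2 l2 0 * PySem.List.pyGetD arr2 l2 0 ≥ PySem.List.pyGetD arr2 r2 0 * PySem.List.pyGetD arr2 r2 0)]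
            rw [pvE_nil h1]
            rw [pvM_nil_left, pvM_nil_left]
            rw [PySem.List.pySetD_of_nonneg result _ hpos0]
            have hd : (result.set pos.toNat (PySem.List.pyGetD arr2 l2 0 * PySem.List.pyGetD arr2 l2 0)).drop ((r1 + 1 - l1).toNat + (r2 + 1 - (l2 + 1)).toNat)
                = PySem.List.pyGetD arr2 l2 0 * PySem.List.pyGetD arr2 l2 0 :: result.drop ((r1 + 1 - l1).toNat + (r2 + 1 - l2).toNat) := by
              have e1 : pos.toNat = ((r1 + 1 - l1).toNat + (r2 + 1 - (l2 + 1)).toNat) := by omega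
              have e2 : ((r1 + 1 - l1).toNat + (r2 + 1 - l2).toNat) = ((r1 + 1 - l1).toNat + (r2 + 1 - (l2 + 1)).toNat) + 1 := by omega
              rw [e1, e2]
              exact pv_drop_set result _ _ (by omega)
            rw [hd]
            simp

-- ===== VERDICT (by name: the statement is the Claim_ definition above) =====
theorem merge_sorted_squares_four_pointers_spec : Claim_equal_merge_sorted_squares_four_pointers := by
  intro arr1 arr2 _hdom
  unfold Spec_merge_sorted_squares_four_pointers
  show pvLoopA arr1 arr2 (arr1.length + arr2.length)
      (List.replicate (arr1.length + arr2.length) 0)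
      ((arr1.length : Int) + (arr2.length : Int) - 1) 0 ((arr1.length : Int) - 1)
      0 ((arr2.length : Int) - 1)
    = merge_sorted_squares_four_pointers_alt arr1 arr2
  rw [pvLoopA_spec arr1 arr2 (arr1.length + arr2.length) _ _ 0 _ 0 _
    (by omega) (by simp only [List.length_replicate]; omega) (by omega)]
  have hdrop : (List.replicate (arr1.length + arr2.length) (0 : Int)).drop
      ((((arr1.length : Int) - 1) + 1 - 0).toNat + (((arr2.length : Int) - 1) + 1 - 0).toNat)
      = [] := by
    apply List.drop_eq_nil_of_le
    simp only [List.length_replicate]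
    omega
  rw [hdrop]
  simp only [merge_sorted_squares_four_pointers_alt]
  rw [pvEnds_eq arr1 arr1.length [] 0 ((arr1.length : Int) - 1) (by omega),
      pvEnds_eq arr2 arr2.length [] 0 ((arr2.length : Int) - 1) (by omega)]
  simp only [List.nil_append]
  rw [pvMergeLoop_eq (pvE arr1 0 ((arr1.length : Int) - 1)) (pvE arr2 0 ((arr2.length : Int) - 1))
    _ [] 0 0 (by omega)]
  simp
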